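-- pv_equiv track=rewrite | github.com/seho27060/nov-algo-study | 1128/1128_seho.py | solution
-- ===== SOURCE A (Python) =====
-- def solution(stones, k):
--     answer = 0
--
--     start = 0
--     end = max(stones)
--
--     while start <= end:
--         cnt = 0
--         mid = (start + end)//2
--
--         check = True
--         for stone in stones:
--             if stone < mid:
--                 cnt += 1
--             else:
--                 cnt = 0
--             if cnt >= k:
--                 end = mid - 1
--                 check = False
--                 break
--         if check:
--             answer = max(answer,mid)
--             start = mid + 1
--
--     return answer
-- ===== SOURCE B (Python) =====
-- def solution(stones, k):
--     # The answer is max(0, min over all k-windows of the window maximum),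
--     # computed in a single pass with a queue-with-running-max built from two stacks.
--     n = len(stones)
--     if k <= 0:
--         return 0
--     if k > n:
--         m = max(stones)
--         return m if m > 0 else 0
--     front = []  # stacks of (value, running max); top = last element
--     back = []
--     w = None
--     for i, v in enumerate(stones):
--         back.append((v, v if not back else max(v, back[-1][1])))
--         if i >= k:
--             if not front:
--                 while back:
--                     u = back.pop()[0]
--                     front.append((u, u if not front else max(u, front[-1][1])))
--             front.pop()
--         if i >= k - 1:
--             if front and back:
--                 m = max(front[-1][1], back[-1][1])
--             elif front:
--                 m = front[-1][1]
--             else: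
--                 m = back[-1][1]
--             if w is None or m < w:
--                 w = m
--     return w if w > 0 else 0
-- ===== Notes on version B (the rewrite author's own statement) =====
-- stated objective: alternative
-- what changed: A's binary search over the step value (rescanning all stones per probe) is replaced by a single linear pass that computes the minimum over all k-windows of the window maximum using a queue-with-running-max built from two stacks, clamped to be >= 0.
import Mathlib
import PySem

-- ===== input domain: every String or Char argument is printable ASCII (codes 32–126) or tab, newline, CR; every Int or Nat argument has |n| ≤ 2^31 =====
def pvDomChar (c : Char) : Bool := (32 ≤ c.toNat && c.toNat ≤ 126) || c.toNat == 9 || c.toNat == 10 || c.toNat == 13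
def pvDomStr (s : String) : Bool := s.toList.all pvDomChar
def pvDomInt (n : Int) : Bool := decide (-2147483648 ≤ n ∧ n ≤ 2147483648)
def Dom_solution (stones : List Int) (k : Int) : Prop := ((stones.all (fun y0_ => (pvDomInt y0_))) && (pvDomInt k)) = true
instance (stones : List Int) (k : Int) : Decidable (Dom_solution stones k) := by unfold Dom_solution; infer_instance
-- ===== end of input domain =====

-- B replaces A's binary search over step values (with a full rescan per probe) by a
-- single pass: a queue-with-running-max (two stacks) yields each k-window's maximum,
-- and the answer is the minimum of those, clamped to 0 (a different algorithm, not
-- claimed faster).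

-- ===== PORT A =====
-- inner 'for stone in stones' loop: false iff it broke (a run of ≥ k stones < mid was found)
def checkA (k mid : Int) : Int → List Int → Bool
  | _, [] => true
  | cnt, stone :: rest =>
    let cnt' := if stone < mid then cnt + 1 else 0
    if k ≤ cnt' then false else checkA k mid cnt' rest

-- the 'while start <= end' binary search
def loopA (stones : List Int) (k : Int) (start e answer : Int) : Int :=
  if h : start ≤ e then
    if checkA k (PySem.Int.floordiv (start + e) 2) 0 stones then
      loopA stones k (PySem.Int.floordiv (start + e) 2 + 1) e
        (max answer (PySem.Int.floordiv (start + e) 2))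
    else loopA stones k start (PySem.Int.floordiv (start + e) 2 - 1) answer
  else answer
termination_by (e + 1 - start).toNat
decreasing_by
  · have hb := PySem.Int.floordiv_two_mid_bounds h; omega
  · have hb := PySem.Int.floordiv_two_mid_bounds h; omega

def solution (stones : List Int) (k : Int) : Int :=
  -- 'end = max(stones)' raises ValueError on []; such inputs are outside Pre_solution,
  -- so the .getD default is never read under the claim.
  loopA stones k 0 ((PySem.List.max? stones (fun y => y)).getD 0) 0

-- ===== PORT B =====
-- Python stacks use append/pop at the END of a list; modelled here with the Lean list
-- HEAD as the stack top (order-isomorphic encoding).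
def pushMax (v : Int) (st : List (Int × Int)) : List (Int × Int) :=
  (v, match st with | [] => v | (_, m) :: _ => max v m) :: st

-- 'while back: front.append(...)' move of Source B
def transfer : List (Int × Int) → List (Int × Int) → List (Int × Int)
  | [], front => front
  | (u, _) :: rest, front => transfer rest (pushMax u front)

-- 'if front and back: ... elif front: ... else: ...' read of the window maximum
def readMax : List (Int × Int) → List (Int × Int) → Int
  | (_, mf) :: _, (_, mb) :: _ => max mf mb
  | (_, mf) :: _, [] => mf
  | [], (_, mb) :: _ => mb
  | [], [] => 0   -- unreachable: the k-window is nonempty at a read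

-- one iteration of Source B's 'for i, v in enumerate(stones)' loop; state = (front, back, w)
def stepB (k : Int) (st : List (Int × Int) × List (Int × Int) × Option Int) (iv : Int × Int) :
    List (Int × Int) × List (Int × Int) × Option Int :=
  let back1 := pushMax iv.2 st.2.1
  let fb :=
    if k ≤ iv.1 then
      let fb0 := if st.1 = [] then (transfer back1 [], ([] : List (Int × Int))) else (st.1, back1)
      (fb0.1.tail, fb0.2)
    else (st.1, back1)
  let w' :=
    if k - 1 ≤ iv.1 then
      let m : Int := readMax fb.1 fb.2
      some (match st.2.2 with | none => m | some x => if m < x then m else x)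
    else st.2.2
  (fb.1, fb.2, w')

def solution_alt (stones : List Int) (k : Int) : Int :=
  if k ≤ 0 then 0
  else if (stones.length : Int) < k then
    -- 'm = max(stones)' raises on []; outside Pre_solution, default never read under the claim
    let m := (PySem.List.max? stones (fun y => y)).getD 0
    if 0 < m then m else 0
  else
    let st := (PySem.List.enumerate stones).foldl (stepB k) ([], [], none)
    match st.2.2 with
    | some w => if 0 < w then w else 0
    | none => 0

-- ===== PRECONDITION & SPEC =====
-- Pre_ excludes only the empty list, on which A's 'max(stones)' raises ValueError.
def Pre_solution (stones : List Int) (k : Int) : Prop := stones ≠ []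
instance (stones : List Int) (k : Int) : Decidable (Pre_solution stones k) := by
  unfold Pre_solution; infer_instance

def pvWitness_solution : List Int × Int := ([1, 2, 0, 2, 1], 2)

def Spec_solution (stones : List Int) (k : Int) (out : Int) : Prop := out = solution_alt stones k
instance (stones : List Int) (k : Int) (out : Int) : Decidable (Spec_solution stones k out) := by
  unfold Spec_solution; infer_instance

-- ===== CLAIM (what is proved, stated in full; the proofs are below) =====
def Claim_equal_solution : Prop := ∀ (stones : List Int) (k : Int), Dom_solution stones k →
  Pre_solution stones k → Spec_solution stones k (solution stones k)

-- ===== LEMMAS AND PROOFS =====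

-- max / min of a nonempty list (0 on [] — never used there)
def mxl : List Int → Int
  | [] => 0
  | [x] => x
  | x :: y :: r => max x (mxl (y :: r))

def mnl : List Int → Int
  | [] => 0
  | [x] => x
  | x :: y :: r => min x (mnl (y :: r))

theorem mxl_cons (x : Int) (l : List Int) (h : l ≠ []) : mxl (x :: l) = max x (mxl l) := by
  cases l with
  | nil => exact absurd rfl h
  | cons y r => rfl

theorem mnl_cons (x : Int) (l : List Int) (h : l ≠ []) : mnl (x :: l) = min x (mnl l) := by
  cases l with
  | nil => exact absurd rfl h
  | cons y r => rfl

theorem mxl_mem (l : List Int) (h : l ≠ []) : mxl l ∈ l := by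
  induction l with
  | nil => exact absurd rfl h
  | cons x t ih =>
    cases t with
    | nil => simp [mxl]
    | cons y r =>
      rw [mxl_cons x (y :: r) (by simp)]
      rcases max_choice x (mxl (y :: r)) with h1 | h1 <;> rw [h1]
      · exact List.mem_cons_self
      · exact List.mem_cons_of_mem _ (ih (by simp))

theorem le_mxl (l : List Int) (x : Int) (h : x ∈ l) : x ≤ mxl l := by
  induction l with
  | nil => simp at h
  | cons a t ih =>
    cases t with
    | nil => simp at h; simp [mxl, h]
    | cons y r =>
      rw [mxl_cons a (y :: r) (by simp)]
      rcases List.mem_cons.mp h with h1 | h1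
      · exact h1 ▸ le_max_left _ _
      · exact le_trans (ih h1) (le_max_right _ _)

theorem mnl_mem (l : List Int) (h : l ≠ []) : mnl l ∈ l := by
  induction l with
  | nil => exact absurd rfl h
  | cons x t ih =>
    cases t with
    | nil => simp [mnl]
    | cons y r =>
      rw [mnl_cons x (y :: r) (by simp)]
      rcases min_choice x (mnl (y :: r)) with h1 | h1 <;> rw [h1]
      · exact List.mem_cons_self
      · exact List.mem_cons_of_mem _ (ih (by simp))

theorem mnl_le (l : List Int) (x : Int) (h : x ∈ l) : mnl l ≤ x := by
  induction l with
  | nil => simp at h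
  | cons a t ih =>
    cases t with
    | nil => simp at h; simp [mnl, h]
    | cons y r =>
      rw [mnl_cons a (y :: r) (by simp)]
      rcases List.mem_cons.mp h with h1 | h1
      · exact h1 ▸ min_le_left _ _
      · exact le_trans (min_le_right _ _) (ih h1)

theorem mxl_append (a b : List Int) (ha : a ≠ []) (hb : b ≠ []) :
    mxl (a ++ b) = max (mxl a) (mxl b) := by
  induction a with
  | nil => exact absurd rfl ha
  | cons x t ih =>
    cases t with
    | nil =>
      cases b with
      | nil => exact absurd rfl hb
      | cons y r => simp [mxl, mxl_cons x (y :: r) (by simp)]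
    | cons y r =>
      have h1 : (y :: r) ++ b ≠ [] := by simp
      rw [List.cons_append, mxl_cons x ((y :: r) ++ b) h1, ih (by simp),
        mxl_cons x (y :: r) (by simp), max_assoc]

theorem mnl_snoc (l : List Int) (x : Int) (h : l ≠ []) : mnl (l ++ [x]) = min (mnl l) x := by
  induction l with
  | nil => exact absurd rfl h
  | cons a t ih =>
    cases t with
    | nil => simp [mnl]
    | cons y r =>
      have h1 : (y :: r) ++ [x] ≠ [] := by simp
      rw [List.cons_append, mnl_cons a ((y :: r) ++ [x]) h1, ih (by simp),
        mnl_cons a (y :: r) (by simp), min_assoc]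

theorem mxl_reverse (l : List Int) : mxl l.reverse = mxl l := by
  cases l with
  | nil => rfl
  | cons x t =>
    have hne : (x :: t) ≠ ([] : List Int) := by simp
    have hne2 : (x :: t).reverse ≠ ([] : List Int) := by simp
    apply le_antisymm
    · exact le_mxl _ _ (List.mem_reverse.mp (mxl_mem _ hne2)) |>.trans_eq rfl
    · exact le_mxl _ _ (List.mem_reverse.mpr (mxl_mem _ hne))

theorem mxl_lt_iff (l : List Int) (h : l ≠ []) (m : Int) : mxl l < m ↔ ∀ x ∈ l, x < m := by
  constructor
  · intro hm x hx; exact lt_of_le_of_lt (le_mxl l x hx) hm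
  · intro hall; exact hall _ (mxl_mem l h)

theorem le_mnl_iff (l : List Int) (h : l ≠ []) (m : Int) : m ≤ mnl l ↔ ∀ x ∈ l, m ≤ x := by
  constructor
  · intro hm x hx; exact le_trans hm (mnl_le l x hx)
  · intro hall; exact hall _ (mnl_mem l h)

-- ---- A-side: characterisation of the inner scan ----

theorem checkA_char (k' : Nat) (hk : 1 ≤ k') (mid : Int) :
    ∀ (l : List Int) (c : Nat),
      (checkA (k' : Int) mid (c : Int) l = true) ↔
        ((∀ p : Nat, 1 ≤ p → p ≤ l.length → (∀ x ∈ l.take p, x < mid) → c + p < k') ∧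
         (∀ i : Nat, i + k' ≤ l.length → ¬ (∀ x ∈ (l.drop i).take k', x < mid))) := by
  intro l
  induction l with
  | nil =>
    intro c
    constructor
    · intro _
      exact ⟨fun p h1 h2 _ => by simp at h2; omega, fun i hi => by simp at hi; omega⟩
    · intro _
      rfl
  | cons x xs ih =>
    intro c
    by_cases hx : x < mid
    · have hcnt : (if x < mid then (c : Int) + 1 else 0) = ((c + 1 : Nat) : Int) := by
        simp [hx]
      by_cases hbr : k' ≤ c + 1
      · have hbr' : ((k' : Nat) : Int) ≤ (if x < mid then (c : Int) + 1 else 0) := by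
          rw [hcnt]; exact_mod_cast hbr
        have hfalse : checkA (k' : Int) mid (c : Int) (x :: xs) = false := by
          simp only [checkA]
          rw [if_pos hbr']
        rw [hfalse]
        simp only [Bool.false_eq_true, false_iff]
        rintro ⟨h1, _⟩
        have := h1 1 le_rfl (by simp) (by
          intro y hy
          simp [List.take_succ_cons] at hy
          exact hy ▸ hx)
        omega
      · have hlt : c + 1 < k' := by omega
        have hbr' : ¬ ((k' : Nat) : Int) ≤ (if x < mid then (c : Int) + 1 else 0) := by
          rw [hcnt]; exact_mod_cast hbr
        have hstep : checkA (k' : Int) mid (c : Int) (x :: xs) =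
            checkA (k' : Int) mid ((c + 1 : Nat) : Int) xs := by
          simp only [checkA]
          rw [if_neg hbr', hcnt]
        rw [hstep, ih (c + 1)]
        constructor
        · rintro ⟨q1, q2⟩
          constructor
          · intro p hp1 hp2 hall
            obtain ⟨p', rfl⟩ : ∃ p', p = p' + 1 := ⟨p - 1, by omega⟩
            rw [List.take_succ_cons] at hall
            by_cases hp0 : p' = 0
            · omega
            · have := q1 p' (by omega) (by simpa using hp2)
                (fun y hy => hall y (List.mem_cons_of_mem _ hy))
              omega
          · intro i hi
            cases i with
            | zero =>
              intro hall
              obtain ⟨k'', rfl⟩ : ∃ k'', k' = k'' + 1 := ⟨k' - 1, by omega⟩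
              rw [List.drop_zero, List.take_succ_cons] at hall
              by_cases hk0 : k'' = 0
              · omega
              · have := q1 k'' (by omega) (by simpa using hi)
                  (fun y hy => hall y (List.mem_cons_of_mem _ hy))
                omega
            | succ j =>
              have := q2 j (by simp only [List.length_cons] at hi; omega)
              rwa [List.drop_succ_cons]
        · rintro ⟨P1, P2⟩
          constructor
          · intro p hp1 hp2 hall
            have := P1 (p + 1) (by omega) (by simpa using hp2) (by
              rw [List.take_succ_cons]
              intro y hy
              rcases List.mem_cons.mp hy with h1 | h1
              · exact h1 ▸ hx
              · exact hall y h1)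
            omega
          · intro i hi
            have := P2 (i + 1) (by simp only [List.length_cons]; omega)
            rwa [List.drop_succ_cons] at this
    · have hbr' : ¬ ((k' : Nat) : Int) ≤ (if x < mid then (c : Int) + 1 else 0) := by
        rw [if_neg hx]
        exact_mod_cast (by omega : ¬ (k' ≤ 0))
      have hstep : checkA (k' : Int) mid (c : Int) (x :: xs) =
          checkA (k' : Int) mid ((0 : Nat) : Int) xs := by
        simp only [checkA]
        rw [if_neg hbr', if_neg hx]
        rfl
      rw [hstep, ih 0]
      constructor
      · rintro ⟨q1, q2⟩
        constructor
        · intro p hp1 hp2 hall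
          obtain ⟨p', rfl⟩ : ∃ p', p = p' + 1 := ⟨p - 1, by omega⟩
          rw [List.take_succ_cons] at hall
          exact absurd (hall x List.mem_cons_self) hx
        · intro i hi
          cases i with
          | zero =>
            intro hall
            obtain ⟨k'', rfl⟩ : ∃ k'', k' = k'' + 1 := ⟨k' - 1, by omega⟩
            rw [List.drop_zero, List.take_succ_cons] at hall
            exact absurd (hall x List.mem_cons_self) hx
          | succ j =>
            have := q2 j (by simp only [List.length_cons] at hi; omega)
            rwa [List.drop_succ_cons]
      · rintro ⟨P1, P2⟩
        constructor
        · intro p hp1 hp2 hall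
          by_contra hge
          have hkp : k' ≤ p := by omega
          have := P2 1 (by simp only [List.length_cons]; omega)
          rw [List.drop_succ_cons, List.drop_zero] at this
          apply this
          intro y hy
          apply hall
          have : xs.take k' = (xs.take p).take k' := by
            rw [List.take_take, min_eq_left hkp]
          exact List.take_subset _ _ (this ▸ hy)
        · intro i hi
          have := P2 (i + 1) (by simp only [List.length_cons]; omega)
          rwa [List.drop_succ_cons] at this

theorem win_ne_nil (s : List Int) (k' i : Nat) (hk : 1 ≤ k') (hi : i + k' ≤ s.length) :
    (s.drop i).take k' ≠ [] := by
  have : ((s.drop i).take k').length = k' := by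
    rw [List.length_take, List.length_drop]; omega
  intro hnil
  rw [hnil] at this
  simp at this
  omega

theorem checkA_iff (k' : Nat) (hk : 1 ≤ k') (mid : Int) (s : List Int) :
    checkA (k' : Int) mid 0 s = true ↔
      ∀ i : Nat, i + k' ≤ s.length → mid ≤ mxl ((s.drop i).take k') := by
  have hchar := checkA_char k' hk mid s 0
  rw [show ((0 : Nat) : Int) = (0 : Int) from rfl] at hchar
  rw [hchar]
  constructor
  · rintro ⟨_, q2⟩ i hi
    have hne := win_ne_nil s k' i hk hi
    have := q2 i hi
    rw [← mxl_lt_iff _ hne mid] at this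
    omega
  · intro H
    constructor
    · intro p hp1 hp2 hall
      by_contra hge
      have hkp : k' ≤ p := by omega
      have h0 := H 0 (by omega)
      rw [List.drop_zero] at h0
      have hne := win_ne_nil s k' 0 hk (by omega)
      rw [List.drop_zero] at hne
      have hlt : mxl (s.take k') < mid := by
        rw [mxl_lt_iff _ hne mid]
        intro y hy
        apply hall
        have heq : s.take k' = (s.take p).take k' := by
          rw [List.take_take, min_eq_left hkp]
        exact List.take_subset _ _ (heq ▸ hy)
      omega
    · intro i hi hall
      have hne := win_ne_nil s k' i hk hi
      have := (mxl_lt_iff _ hne mid).mpr hall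
      have := H i hi
      omega

-- minimum over all k'-window maxima of the first t elements
def wmin (s : List Int) (k' t : Nat) : Int :=
  mnl ((List.range (t - k' + 1)).map (fun i => mxl ((s.drop i).take k')))

theorem checkA_iff_thresh (k' : Nat) (s : List Int) (hk : 1 ≤ k') (hn : k' ≤ s.length)
    (mid : Int) : checkA (k' : Int) mid 0 s = true ↔ mid ≤ wmin s k' s.length := by
  rw [checkA_iff k' hk mid s]
  unfold wmin
  have hne : (List.range (s.length - k' + 1)).map (fun i => mxl ((s.drop i).take k')) ≠ [] := by
    simp
  rw [le_mnl_iff _ hne]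
  constructor
  · intro H y hy
    obtain ⟨i, hi, rfl⟩ := List.mem_map.mp hy
    exact H i (by rw [List.mem_range] at hi; omega)
  · intro H i hi
    exact H _ (List.mem_map.mpr ⟨i, List.mem_range.mpr (by omega), rfl⟩)

theorem checkA_true_of_big (k' : Nat) (s : List Int) (hk : 1 ≤ k') (hn : s.length < k')
    (mid : Int) : checkA (k' : Int) mid 0 s = true := by
  have hchar := checkA_char k' hk mid s 0
  rw [show ((0 : Nat) : Int) = (0 : Int) from rfl] at hchar
  rw [hchar]
  exact ⟨fun p h1 h2 _ => by omega, fun i hi => by omega⟩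

theorem checkA_false_of_nonpos (k mid : Int) (hk : k ≤ 0) (s : List Int) (hs : s ≠ []) :
    checkA k mid 0 s = false := by
  cases s with
  | nil => exact absurd rfl hs
  | cons x rest =>
    simp only [checkA]
    have : k ≤ (if x < mid then (0 : Int) + 1 else 0) := by split_ifs <;> omega
    rw [if_pos this]

-- ---- A-side: the binary search against a threshold predicate ----

theorem loopA_eq (s : List Int) (k V : Int) :
    ∀ (fuel : Nat) (st e a : Int), (e + 1 - st).toNat ≤ fuel →
      (∀ m : Int, st ≤ m → m ≤ e → (checkA k m 0 s = true ↔ m ≤ V)) →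
      loopA s k st e a = if st ≤ e ∧ st ≤ V then max a (min e V) else a := by
  intro fuel
  induction fuel with
  | zero =>
    intro st e a hf H
    have hse : ¬ st ≤ e := by omega
    rw [loopA, dif_neg hse, if_neg (by omega)]
  | succ fl ih =>
    intro st e a hf H
    by_cases hse : st ≤ e
    · have hb := PySem.Int.floordiv_two_mid_bounds hse
      rw [loopA, dif_pos hse]
      set mid := PySem.Int.floordiv (st + e) 2 with hmid
      by_cases hc : checkA k mid 0 s = true
      · have hmV : mid ≤ V := (H mid hb.1 hb.2).mp hc
        rw [if_pos hc]
        rw [ih (mid + 1) e (max a mid) (by omega) (fun m h1 h2 => H m (by omega) h2)]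
        simp only [max_def, min_def]
        split_ifs <;> omega
      · have hmV : V < mid := by
          by_contra hnot
          exact hc ((H mid hb.1 hb.2).mpr (by omega))
        rw [if_neg hc]
        rw [ih st (mid - 1) a (by omega) (fun m h1 h2 => H m h1 (by omega))]
        simp only [max_def, min_def]
        split_ifs <;> omega
    · rw [loopA, dif_neg hse, if_neg (by omega)]

theorem foldl_max_eq_mxl (t : List Int) : ∀ x : Int, t.foldl max x = mxl (x :: t) := by
  induction t with
  | nil => intro x; rfl
  | cons y r ih =>
    intro x
    rw [List.foldl_cons, ih (max x y)]
    cases r with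
    | nil => simp [mxl]
    | cons z r' =>
      rw [mxl_cons (max x y) (z :: r') (by simp), mxl_cons x (y :: z :: r') (by simp),
        mxl_cons y (z :: r') (by simp), max_assoc]

theorem maxD_eq_mxl (s : List Int) (h : s ≠ []) :
    (PySem.List.max? s (fun y => y)).getD 0 = mxl s := by
  cases s with
  | nil => exact absurd rfl h
  | cons x t =>
    rw [PySem.List.max?_id_cons]
    simp only [Option.getD_some]
    exact foldl_max_eq_mxl t x

-- ---- B-side: stacks with running max ----

def OKst : List (Int × Int) → Prop
  | [] => True
  | (v, m) :: rest => OKst rest ∧ m = (match rest with | [] => v | (_, m2) :: _ => max v m2)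

theorem OKst_nil : OKst ([] : List (Int × Int)) := trivial

theorem OKst_pushMax (v : Int) (st : List (Int × Int)) (h : OKst st) : OKst (pushMax v st) := by
  cases st with
  | nil => exact ⟨trivial, rfl⟩
  | cons p rest => exact ⟨h, rfl⟩

theorem OKst_tail (st : List (Int × Int)) (h : OKst st) : OKst st.tail := by
  cases st with
  | nil => trivial
  | cons p rest => exact h.1

theorem OKst_head (st : List (Int × Int)) (h : OKst st) (p : Int × Int) (rest : List (Int × Int))
    (he : st = p :: rest) : p.2 = mxl (st.map Prod.fst) := by
  induction st generalizing p rest with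
  | nil => simp at he
  | cons q t ih =>
    obtain ⟨v, m⟩ := q
    obtain ⟨rfl, rfl⟩ : (v, m) = p ∧ t = rest := by
      constructor <;> [exact (List.cons.injEq _ _ _ _ ▸ he).1; exact (List.cons.injEq _ _ _ _ ▸ he).2]
    obtain ⟨ht, hm⟩ := h
    cases t with
    | nil => simpa [mxl] using hm
    | cons q2 r2 =>
      obtain ⟨v2, m2⟩ := q2
      have h2 := ih ht (v2, m2) r2 rfl
      simp only at hm
      rw [List.map_cons, mxl_cons v (((v2, m2) :: r2).map Prod.fst) (by simp), ← h2]
      exact hm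

theorem OKst_transfer (b f : List (Int × Int)) (h : OKst f) : OKst (transfer b f) := by
  induction b generalizing f with
  | nil => exact h
  | cons p rest ih => exact ih _ (OKst_pushMax p.1 f h)

theorem transfer_map_fst (b f : List (Int × Int)) :
    (transfer b f).map Prod.fst = (b.map Prod.fst).reverse ++ f.map Prod.fst := by
  induction b generalizing f with
  | nil => simp [transfer]
  | cons p rest ih =>
    obtain ⟨u, m⟩ := p
    rw [show transfer ((u, m) :: rest) f = transfer rest (pushMax u f) from rfl, ih]
    simp [pushMax]

theorem readMax_eq_mxl (f b : List (Int × Int)) (hf : OKst f) (hb : OKst b)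
    (hne : ¬ (f = [] ∧ b = [])) :
    readMax f b = mxl (f.map Prod.fst ++ (b.map Prod.fst).reverse) := by
  cases f with
  | nil =>
    cases b with
    | nil => exact absurd ⟨rfl, rfl⟩ hne
    | cons q r =>
      obtain ⟨vb, mb⟩ := q
      have h1 := OKst_head _ hb (vb, mb) r rfl
      show mb = mxl (List.map Prod.fst [] ++ (List.map Prod.fst ((vb, mb) :: r)).reverse)
      rw [List.map_nil, List.nil_append, mxl_reverse]
      exact h1
  | cons p rf =>
    obtain ⟨vf, mf⟩ := p
    have h2 := OKst_head _ hf (vf, mf) rf rfl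
    cases b with
    | nil =>
      simp only [readMax, List.map_nil, List.reverse_nil, List.append_nil]
      exact h2
    | cons q rb =>
      obtain ⟨vb, mb⟩ := q
      have h1 := OKst_head _ hb (vb, mb) rb rfl
      simp only [readMax]
      rw [mxl_append _ _ (by simp) (by simp), mxl_reverse, ← h1, ← h2]

-- the tail of an append with nonempty left part
theorem tail_append_left (l1 l2 : List Int) (h : l1 ≠ []) : (l1 ++ l2).tail = l1.tail ++ l2 := by
  cases l1 with
  | nil => exact absurd rfl h
  | cons x r => simp

-- the loop invariant after t iterations
def InvB (s : List Int) (k' t : Nat) (st : List (Int × Int) × List (Int × Int) × Option Int) :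
    Prop :=
  OKst st.1 ∧ OKst st.2.1 ∧
  st.1.map Prod.fst ++ (st.2.1.map Prod.fst).reverse = (s.take t).drop (t - k') ∧
  st.2.2 = if k' ≤ t then some (wmin s k' t) else none

theorem stepB_nopop (k' : Nat) (f b : List (Int × Int)) (w : Option Int) (t : Nat) (v : Int)
    (hnot : ¬ ((k' : Int) ≤ (t : Int))) :
    stepB (k' : Int) (f, b, w) ((t : Int), v) = (f, pushMax v b,
      if (k' : Int) - 1 ≤ (t : Int) then
        some (match w with
              | none => readMax f (pushMax v b)
              | some x => if readMax f (pushMax v b) < x then readMax f (pushMax v b) else x)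
      else w) := by
  simp only [stepB, hnot, if_false]

theorem stepB_pop_ne (k' : Nat) (f b : List (Int × Int)) (w : Option Int) (t : Nat) (v : Int)
    (hle : ((k' : Int) ≤ (t : Int))) (hfne : f ≠ []) :
    stepB (k' : Int) (f, b, w) ((t : Int), v) = (f.tail, pushMax v b,
      if (k' : Int) - 1 ≤ (t : Int) then
        some (match w with
              | none => readMax f.tail (pushMax v b)
              | some x => if readMax f.tail (pushMax v b) < x
                          then readMax f.tail (pushMax v b) else x)
      else w) := by
  simp only [stepB, hle, if_true, if_neg hfne]

theorem stepB_pop_nil (k' : Nat) (b : List (Int × Int)) (w : Option Int) (t : Nat) (v : Int)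
    (hle : ((k' : Int) ≤ (t : Int))) :
    stepB (k' : Int) (([] : List (Int × Int)), b, w) ((t : Int), v) =
      ((transfer (pushMax v b) []).tail, ([] : List (Int × Int)),
      if (k' : Int) - 1 ≤ (t : Int) then
        some (match w with
              | none => readMax (transfer (pushMax v b) []).tail []
              | some x => if readMax (transfer (pushMax v b) []).tail [] < x
                          then readMax (transfer (pushMax v b) []).tail [] else x)
      else w) := by
  simp only [stepB, hle, if_true]

theorem invB_step (s : List Int) (k' : Nat) (hk : 1 ≤ k') (t : Nat) (ht : t < s.length)
    (st : List (Int × Int) × List (Int × Int) × Option Int) (hI : InvB s k' t st) :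
    InvB s k' (t + 1) (stepB (k' : Int) st ((t : Int), s.getD t 0)) := by
  obtain ⟨f, b, w⟩ := st
  obtain ⟨hf, hb, hc, hw⟩ := hI
  dsimp only at hf hb hc hw
  set v := s.getD t 0 with hv
  have htake : s.take (t + 1) = s.take t ++ [v] := by
    rw [hv, List.getD_eq_getElem s 0 ht]
    exact List.take_succ_eq_append_getElem ht
  have hlen_take : (s.take t).length = t := by
    rw [List.length_take]; omega
  have hpush : (pushMax v b).map Prod.fst = v :: b.map Prod.fst := by
    simp [pushMax]
  have hcont1 : f.map Prod.fst ++ ((pushMax v b).map Prod.fst).reverse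
      = (s.take t).drop (t - k') ++ [v] := by
    rw [hpush, List.reverse_cons, ← List.append_assoc, hc]
  by_cases hkt : k' ≤ t
  · -- pop (and read) branch
    have hle : ((k' : Int) ≤ (t : Int)) := by exact_mod_cast hkt
    have hread : ((k' : Int) - 1 ≤ (t : Int)) := by omega
    have hwold : w = some (wmin s k' t) := by rw [hw, if_pos hkt]
    have hwin_ne : (s.take t).drop (t - k') ≠ [] := by
      have hl : ((s.take t).drop (t - k')).length = k' := by
        rw [List.length_drop, hlen_take]; omega
      intro h0; rw [h0] at hl; simp at hl; omega
    have hside : t - k' + 1 ≤ (s.take t).length := by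
      rw [hlen_take]; omega
    have hnewwin : ((s.take t).drop (t - k')).tail ++ [v] = (s.take (t + 1)).drop (t + 1 - k') := by
      rw [List.tail_drop, htake, show t + 1 - k' = t - k' + 1 by omega,
        List.drop_append_of_le_length hside]
    have hwinform : (s.take (t + 1)).drop (t + 1 - k') = (s.drop (t + 1 - k')).take k' := by
      rw [List.drop_take]
      congr 1
      omega
    have hwlen : ((s.take (t + 1)).drop (t + 1 - k')).length = k' := by
      simp only [List.length_drop, List.length_take]; omega
    have hwmin : ∀ m : Int, m = mxl ((s.drop (t + 1 - k')).take k') →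
        wmin s k' (t + 1) = min (wmin s k' t) m := by
      intro m hm
      unfold wmin
      have h1 : t + 1 - k' + 1 = (t - k' + 1) + 1 := by omega
      rw [h1, List.range_succ, List.map_append]
      simp only [List.map_cons, List.map_nil]
      rw [mnl_snoc _ _ (by simp)]
      rw [hm, show t + 1 - k' = t - k' + 1 from by omega]
    by_cases hfe : f = []
    · subst hfe
      rw [stepB_pop_nil k' b w t v hle]
      have hcont1' : ((pushMax v b).map Prod.fst).reverse = (s.take t).drop (t - k') ++ [v] := by
        simpa using hcont1
      have htr : (transfer (pushMax v b) []).map Prod.fst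
          = (s.take t).drop (t - k') ++ [v] := by
        rw [transfer_map_fst]
        simpa using hcont1'
      have hcont2 : (transfer (pushMax v b) []).tail.map Prod.fst
          ++ (([] : List (Int × Int)).map Prod.fst).reverse
          = (s.take (t + 1)).drop (t + 1 - k') := by
        rw [List.map_nil, List.reverse_nil, List.append_nil, List.map_tail, htr,
          tail_append_left _ _ hwin_ne, hnewwin]
      have hOKtr : OKst (transfer (pushMax v b) []).tail :=
        OKst_tail _ (OKst_transfer _ _ OKst_nil)
      refine ⟨hOKtr, OKst_nil, hcont2, ?_⟩
      have hne2 : ¬ ((transfer (pushMax v b) []).tail = [] ∧ ([] : List (Int × Int)) = []) := by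
        rintro ⟨h1, -⟩
        rw [h1] at hcont2
        simp only [List.map_nil, List.reverse_nil, List.append_nil] at hcont2
        rw [← hcont2] at hwlen
        simp at hwlen
        omega
      have hm := readMax_eq_mxl _ _ hOKtr OKst_nil hne2
      have hmval : readMax (transfer (pushMax v b) []).tail [] =
          mxl ((s.drop (t + 1 - k')).take k') := by
        rw [hm]
        simp only [List.map_nil, List.reverse_nil, List.append_nil]
        rw [List.map_tail, htr, tail_append_left _ _ hwin_ne, hnewwin, hwinform]
      rw [if_pos hread, hwold]
      dsimp only
      rw [if_pos (show k' ≤ t + 1 by omega), hwmin _ hmval]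
      congr 1
      rw [min_def]
      split_ifs <;> omega
    · rw [stepB_pop_ne k' f b w t v hle hfe]
      have hcont2 : f.tail.map Prod.fst ++ ((pushMax v b).map Prod.fst).reverse
          = (s.take (t + 1)).drop (t + 1 - k') := by
        rw [List.map_tail, ← tail_append_left _ _ (by simpa using hfe), hcont1,
          tail_append_left _ _ hwin_ne, hnewwin]
      refine ⟨OKst_tail _ hf, OKst_pushMax _ _ hb, hcont2, ?_⟩
      have hne2 : ¬ (f.tail = [] ∧ pushMax v b = []) := by
        rintro ⟨-, h2⟩
        simp [pushMax] at h2
      have hm := readMax_eq_mxl _ _ (OKst_tail _ hf) (OKst_pushMax _ _ hb) hne2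
      have hmval : readMax f.tail (pushMax v b) = mxl ((s.drop (t + 1 - k')).take k') := by
        rw [hm, hcont2, hwinform]
      rw [if_pos hread, hwold]
      dsimp only
      rw [if_pos (show k' ≤ t + 1 by omega), hwmin _ hmval]
      congr 1
      rw [min_def]
      split_ifs <;> omega
  · -- no pop
    have hnot : ¬ ((k' : Int) ≤ (t : Int)) := by exact_mod_cast hkt
    rw [stepB_nopop k' f b w t v hnot]
    have hz : t - k' = 0 := by omega
    have hz1 : t + 1 - k' = 0 := by omega
    have hcont2 : f.map Prod.fst ++ ((pushMax v b).map Prod.fst).reverse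
        = (s.take (t + 1)).drop (t + 1 - k') := by
      rw [hcont1, hz1, List.drop_zero, htake, hz, List.drop_zero]
    have hwnone : w = none := by rw [hw, if_neg hkt]
    refine ⟨hf, OKst_pushMax _ _ hb, hcont2, ?_⟩
    by_cases hr : k' = t + 1
    · have hread : ((k' : Int) - 1 ≤ (t : Int)) := by
        have : (k' : Int) = (t : Int) + 1 := by exact_mod_cast hr
        omega
      have hne2 : ¬ (f = [] ∧ pushMax v b = []) := by
        rintro ⟨-, h2⟩
        simp [pushMax] at h2
      have hm := readMax_eq_mxl _ _ hf (OKst_pushMax _ _ hb) hne2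
      have hwmval : wmin s k' (t + 1) = mxl ((s.drop 0).take k') := by
        unfold wmin
        rw [hz1]
        rfl
      rw [if_pos hread, hwnone]
      dsimp only
      rw [if_pos (show k' ≤ t + 1 by omega), hm, hcont2, hwmval, hz1, List.drop_zero,
        List.drop_zero, hr]
    · have hread : ¬ ((k' : Int) - 1 ≤ (t : Int)) := by
        have h1 : ¬ ((k' : Int) ≤ (t : Int) + 1) := by exact_mod_cast (by omega : ¬ (k' ≤ t + 1))
        omega
      rw [if_neg hread, hwnone, if_neg (by omega : ¬ k' ≤ t + 1)]

theorem invB_fold (s : List Int) (k' : Nat) (hk : 1 ≤ k') :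
    ∀ t, t ≤ s.length →
      InvB s k' t ((PySem.List.enumerate (s.take t)).foldl (stepB (k' : Int)) ([], [], none)) := by
  intro t
  induction t with
  | zero =>
    intro _
    simp only [List.take_zero, PySem.List.enumerate_nil, List.foldl_nil]
    exact ⟨OKst_nil, OKst_nil, by simp, by rw [if_neg (by omega : ¬ k' ≤ 0)]⟩
  | succ t ih =>
    intro ht1
    have ht : t < s.length := by omega
    have htk : s.take (t + 1) = s.take t ++ [s.getD t 0] := by
      rw [List.getD_eq_getElem s 0 ht]
      exact List.take_succ_eq_append_getElem ht
    rw [htk, PySem.List.enumerate_append, List.foldl_append]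
    have h0 : (0 : Int) + ((s.take t).length : Int) = ((t : Nat) : Int) := by
      rw [show (s.take t).length = t from by rw [List.length_take]; omega]
      ring
    rw [h0, PySem.List.enumerate_cons, PySem.List.enumerate_nil, List.foldl_cons,
      List.foldl_nil]
    exact invB_step s k' hk t ht _ (ih (by omega))

theorem wmin_le_mxl (s : List Int) (k' : Nat) (hk : 1 ≤ k') (hn : k' ≤ s.length) :
    wmin s k' s.length ≤ mxl s := by
  have h0mem : mxl ((s.drop 0).take k')
      ∈ (List.range (s.length - k' + 1)).map (fun i => mxl ((s.drop i).take k')) :=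
    List.mem_map.mpr ⟨0, List.mem_range.mpr (by omega), rfl⟩
  have h1 : wmin s k' s.length ≤ mxl ((s.drop 0).take k') := mnl_le _ _ h0mem
  have hne : (s.drop 0).take k' ≠ [] := win_ne_nil s k' 0 hk (by omega)
  have h2 : mxl ((s.drop 0).take k') ≤ mxl s := by
    apply le_mxl
    rw [List.drop_zero] at *
    exact List.take_subset _ _ (mxl_mem _ hne)
  omega

-- ===== VERDICT (by name: the statement is the Claim_ definition above) =====
theorem solution_spec : Claim_equal_solution := by
  intro stones k hdom hpre
  unfold Spec_solution
  have hM := maxD_eq_mxl stones hpre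
  by_cases hk0 : k ≤ 0
  · have hB : solution_alt stones k = 0 := by
      unfold solution_alt
      rw [if_pos hk0]
    rw [hB]
    unfold solution
    rw [hM]
    rw [loopA_eq stones k (-1) ((mxl stones + 1 - 0).toNat) 0 (mxl stones) 0 le_rfl
      (fun m h1 h2 => by
        rw [checkA_false_of_nonpos k m hk0 stones hpre]
        constructor
        · intro h; simp at h
        · intro h; omega)]
    rw [if_neg (by omega)]
  · have hkpos : 0 < k := by omega
    obtain ⟨k', rfl⟩ : ∃ k' : Nat, k = (k' : Int) :=
      ⟨k.toNat, (Int.toNat_of_nonneg (by omega)).symm⟩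
    have hk1 : 1 ≤ k' := by exact_mod_cast hkpos
    by_cases hbig : stones.length < k'
    · unfold solution solution_alt
      rw [if_neg hk0, if_pos (by exact_mod_cast hbig), hM]
      rw [loopA_eq stones (k' : Int) (mxl stones) ((mxl stones + 1 - 0).toNat) 0 (mxl stones) 0
        le_rfl
        (fun m h1 h2 => by
          rw [checkA_true_of_big k' stones hk1 hbig m]
          simp [h2])]
      simp only [max_def, min_def]
      split_ifs <;> omega
    · have hn : k' ≤ stones.length := by omega
      unfold solution solution_alt
      rw [if_neg hk0, if_neg (by exact_mod_cast (not_lt.mpr hn) : ¬ (stones.length : Int) < (k' : Int)), hM]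
      have hfold := invB_fold stones k' hk1 stones.length le_rfl
      rw [List.take_length] at hfold
      obtain ⟨-, -, -, hwv⟩ := hfold
      rw [if_pos hn] at hwv
      dsimp only
      rw [hwv]
      rw [loopA_eq stones (k' : Int) (wmin stones k' stones.length)
        ((mxl stones + 1 - 0).toNat) 0 (mxl stones) 0 le_rfl
        (fun m h1 h2 => checkA_iff_thresh k' stones hk1 hn m)]
      have hWM := wmin_le_mxl stones k' hk1 hn
      dsimp only
      simp only [max_def, min_def]
      split_ifs <;> omega
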